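-- pv_equiv track=rewrite | github.com/LalitMaganti/syntaqlite | python/sqlite_extractor/transforms.py | apply
-- ===== SOURCE A (Python) =====
-- def apply(content: str) -> str:
--     marker = "May you share freely"
--     idx = content.find(marker)
--     if idx == -1:
--         return content
--
--     # Find end of comment
--     end = content.find("*/", idx)
--     if end == -1:
--         return content
--
--     # Skip past the comment and any trailing whitespace
--     end += 2
--     while end < len(content) and content[end] in " \t\n":
--         end += 1
--
--     return content[end:]
-- ===== SOURCE B (Python) =====
-- def apply(content: str) -> str:
--     # Single left-to-right pass: a three-state scanner (lexer style) instead of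
--     # staged find()/partition() searches.
--     marker = "May you share freely"
--     SEEK_MARKER, SEEK_CLOSE, SKIP_WS = 0, 1, 2
--     state = SEEK_MARKER
--     i, n = 0, len(content)
--     while i < n:
--         if state == SEEK_MARKER:
--             if content.startswith(marker, i):
--                 state = SEEK_CLOSE
--                 i += len(marker)
--             else:
--                 i += 1
--         elif state == SEEK_CLOSE:
--             if content.startswith("*/", i):
--                 state = SKIP_WS
--                 i += 2
--             else:
--                 i += 1
--         elif content[i] in " \t\n":
--             i += 1
--         else:
--             break
--     return content[i:] if state == SKIP_WS else content
-- ===== Notes on version B (the rewrite author's own statement) =====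
-- stated objective: alternative
-- what changed: B replaces A's staged searches (find the marker, find '*/' from that index, then a whitespace-skipping while loop) with a single left-to-right pass of an explicit three-state scanner (SEEK_MARKER / SEEK_CLOSE / SKIP_WS) over one index, checking startswith at each position.
import Mathlib
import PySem

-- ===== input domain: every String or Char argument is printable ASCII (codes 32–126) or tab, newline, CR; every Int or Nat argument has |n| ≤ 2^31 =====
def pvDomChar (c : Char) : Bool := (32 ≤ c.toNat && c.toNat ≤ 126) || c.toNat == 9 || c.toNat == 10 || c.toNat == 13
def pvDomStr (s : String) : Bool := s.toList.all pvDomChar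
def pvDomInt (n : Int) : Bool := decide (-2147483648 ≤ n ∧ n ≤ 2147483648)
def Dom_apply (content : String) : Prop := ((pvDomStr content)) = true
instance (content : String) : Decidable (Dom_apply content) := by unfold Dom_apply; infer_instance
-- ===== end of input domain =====

-- B replaces A's staged searches (find, find-from-index, whitespace while loop)
-- with ONE left-to-right pass of a three-state scanner (objective: alternative).

-- ===== PORT A =====
-- the while loop 'while end < len(content) and content[end] in " \t\n": end += 1';
-- 'c in " \t\n"' for the single char content[end] is exactly list membership (ported by hand, exact)
def applySkip (cs : List Char) (e : Nat) : Nat :=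
  if h : e < cs.length then
    if cs[e] ∈ [' ', '\t', '\n'] then applySkip cs (e + 1) else e
  else e
termination_by cs.length - e

def apply (content : String) : String :=
  let marker := "May you share freely"
  let idx := PySem.Str.find content marker
  if idx == -1 then content
  else
    let e := PySem.Str.findFrom content "*/" idx
    if e == -1 then content
    else
      -- end += 2; end ≥ 0 here (a found index), so the Nat-indexed loop is exact
      let e2 := applySkip content.toList (e.toNat + 2)
      PySem.Str.slice content (some (e2 : Int)) none

-- ===== PORT B =====
def bMarker : List Char := "May you share freely".toList

-- the scanner's while loop; state 0 = SEEK_MARKER, 1 = SEEK_CLOSE, 2 = SKIP_WS.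
-- 'content.startswith(sub, i)' for i < len(content) is exactly isPrefixOf on the drop
-- (ported by hand, exact); returns the final (i, state)
def altLoop (cs : List Char) (i : Nat) (state : Nat) : Nat × Nat :=
  if h : i < cs.length then
    if state = 0 then
      if bMarker.isPrefixOf (cs.drop i) then altLoop cs (i + bMarker.length) 1
      else altLoop cs (i + 1) 0
    else if state = 1 then
      if ['*', '/'].isPrefixOf (cs.drop i) then altLoop cs (i + 2) 2
      else altLoop cs (i + 1) 1
    else
      if cs[i] ∈ [' ', '\t', '\n'] then altLoop cs (i + 1) 2 else (i, state)
  else (i, state)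
termination_by cs.length - i
decreasing_by all_goals simp [bMarker] at *; omega

def apply_alt (content : String) : String :=
  let r := altLoop content.toList 0 0
  if r.2 = 2 then String.ofList (content.toList.drop r.1) else content

-- ===== PRECONDITION & SPEC =====
def Spec_apply (content : String) (out : String) : Prop := out = apply_alt content
instance (content : String) (out : String) : Decidable (Spec_apply content out) := by unfold Spec_apply; infer_instance

-- ===== CLAIM (what is proved, stated in full; the proofs are below) =====
def Claim_equal_apply : Prop := ∀ (content : String), Dom_apply content → Spec_apply content (apply content)

-- ===== LEMMAS AND PROOFS =====

theorem prefix_drop_infix (cs sub : List Char) (k : Nat) (h : sub <+: cs.drop k) :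
    sub <:+: cs :=
  h.isInfix.trans (List.drop_suffix k cs).isInfix

theorem drop_append_ge {α : Type} (p cs : List α) (j : Nat) (h : p.length ≤ j) :
    (p ++ cs).drop j = cs.drop (j - p.length) := by
  conv_lhs => rw [show j = p.length + (j - p.length) by omega]
  rw [← List.drop_drop, List.drop_left]

theorem find_eq_of_first (cs sub : List Char) (n : Nat)
    (h1 : sub <+: cs.drop n) (h2 : ∀ i < n, ¬ sub <+: cs.drop i) :
    PySem.Chars.find cs sub = (n : Int) := by
  have hnn : 0 ≤ PySem.Chars.find cs sub := by
    rw [PySem.Chars.find_nonneg_iff]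
    exact (PySem.Chars.isIn_iff_infix sub cs).mp
      ((PySem.Chars.exists_prefix_drop_iff_isIn sub cs).mp ⟨n, h1⟩)
  obtain ⟨hf1, hf2⟩ := PySem.Chars.find_spec (s := cs) (sub := sub) hnn
  have hle : (PySem.Chars.find cs sub).toNat ≤ n := by
    by_contra h
    exact (hf2 n (by omega)) h1
  have hge : n ≤ (PySem.Chars.find cs sub).toNat := by
    by_contra h
    exact (h2 _ (by omega)) hf1
  omega

theorem find_append_of_no_left (p cs sub : List Char)
    (hp : ∀ j < p.length, ¬ sub <+: (p ++ cs).drop j) :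
    PySem.Chars.find (p ++ cs) sub =
      if PySem.Chars.find cs sub = -1 then -1 else (p.length : Int) + PySem.Chars.find cs sub := by
  by_cases hcs : PySem.Chars.find cs sub = -1
  · simp only [hcs, if_pos]
    rw [PySem.Chars.find_eq_neg_one_iff] at hcs ⊢
    intro hinf
    obtain ⟨j, hj⟩ := (PySem.Chars.exists_prefix_drop_iff_isIn sub (p ++ cs)).symm.mp
      ((PySem.Chars.isIn_iff_infix sub (p ++ cs)).mpr hinf)
    by_cases hjp : j < p.length
    · exact hp j hjp hj
    · apply hcs
      have hdj : (p ++ cs).drop j = cs.drop (j - p.length) :=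
        drop_append_ge p cs j (by omega)
      rw [hdj] at hj
      exact prefix_drop_infix cs sub _ hj
  · have hnn : 0 ≤ PySem.Chars.find cs sub := by
      have := PySem.Chars.neg_one_le_find cs sub
      omega
    set n := (PySem.Chars.find cs sub).toNat with hn
    have hfn : PySem.Chars.find cs sub = (n : Int) := by omega
    obtain ⟨hf1, hf2⟩ := PySem.Chars.find_spec (s := cs) (sub := sub) hnn
    rw [if_neg hcs, hfn]
    have : PySem.Chars.find (p ++ cs) sub = ((p.length + n : Nat) : Int) := by
      apply find_eq_of_first
      · rw [← List.drop_drop, List.drop_left]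
        exact hf1
      · intro i hi
        by_cases hip : i < p.length
        · exact hp i hip
        · rw [drop_append_ge p cs i (by omega)]
          exact hf2 _ (by omega)
    rw [this]
    push_cast
    ring

-- B's SEEK_MARKER phase ends at the first marker occurrence
theorem loop0_found (cs : List Char) (i n : Nat) (hi : i ≤ n)
    (h1 : bMarker <+: cs.drop n) (h2 : ∀ k, i ≤ k → k < n → ¬ bMarker <+: cs.drop k) :
    altLoop cs i 0 = altLoop cs (n + bMarker.length) 1 := by
  have hn : n < cs.length := by
    have hl := h1.length_le
    simp only [List.length_drop] at hl
    have : 0 < bMarker.length := by decide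
    omega
  induction hni : n - i generalizing i with
  | zero =>
      have : i = n := by omega
      subst this
      rw [altLoop, dif_pos hn, if_pos rfl, if_pos (List.isPrefixOf_iff_prefix.mpr h1)]
  | succ d ih =>
      rw [altLoop, dif_pos (by omega), if_pos rfl,
        if_neg (by rw [List.isPrefixOf_iff_prefix]; exact h2 i le_rfl (by omega))]
      exact ih (i + 1) (by omega) (fun k hk hk' => h2 k (by omega) hk') (by omega)

-- if the marker never occurs, B's scanner ends in state 0
theorem loop0_none (cs : List Char) (i : Nat)
    (h2 : ∀ k, ¬ bMarker <+: cs.drop k) : (altLoop cs i 0).2 = 0 := by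
  induction hni : cs.length - i generalizing i with
  | zero => rw [altLoop, dif_neg (by omega)]
  | succ d ih =>
      rw [altLoop, dif_pos (by omega), if_pos rfl,
        if_neg (by rw [List.isPrefixOf_iff_prefix]; exact h2 i)]
      exact ih (i + 1) (by omega)

-- B's SEEK_CLOSE phase ends right after the first "*/" at or past i
theorem loop1_found (cs : List Char) (i n : Nat) (hi : i ≤ n)
    (h1 : ['*', '/'] <+: cs.drop n) (h2 : ∀ k, i ≤ k → k < n → ¬ ['*', '/'] <+: cs.drop k) :
    altLoop cs i 1 = altLoop cs (n + 2) 2 := by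
  have hn : n < cs.length := by
    have hl := h1.length_le
    simp only [List.length_drop, List.length_cons, List.length_nil] at hl
    omega
  induction hni : n - i generalizing i with
  | zero =>
      have : i = n := by omega
      subst this
      rw [altLoop, dif_pos hn, if_neg (by omega), if_pos rfl,
        if_pos (List.isPrefixOf_iff_prefix.mpr h1)]
  | succ d ih =>
      rw [altLoop, dif_pos (by omega), if_neg (by omega), if_pos rfl,
        if_neg (by rw [List.isPrefixOf_iff_prefix]; exact h2 i le_rfl (by omega))]
      exact ih (i + 1) (by omega) (fun k hk hk' => h2 k (by omega) hk') (by omega)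

-- if "*/" never occurs at or past i, B's scanner ends in state 1
theorem loop1_none (cs : List Char) (i : Nat)
    (h2 : ∀ k, i ≤ k → ¬ ['*', '/'] <+: cs.drop k) : (altLoop cs i 1).2 = 1 := by
  induction hni : cs.length - i generalizing i with
  | zero => rw [altLoop, dif_neg (by omega)]
  | succ d ih =>
      rw [altLoop, dif_pos (by omega), if_neg (by omega), if_pos rfl,
        if_neg (by rw [List.isPrefixOf_iff_prefix]; exact h2 i le_rfl)]
      exact ih (i + 1) (fun k hk => h2 k (by omega)) (by omega)

-- B's SKIP_WS phase computes exactly A's whitespace-skipping index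
theorem loop2_skip (cs : List Char) (e : Nat) :
    altLoop cs e 2 = (applySkip cs e, 2) := by
  fun_induction applySkip cs e with
  | case1 e h hc ih => rw [altLoop, dif_pos h, if_neg (by omega), if_neg (by omega), if_pos hc, ih]
  | case2 e h hc => rw [altLoop, dif_pos h, if_neg (by omega), if_neg (by omega), if_neg hc]
  | case3 e h => rw [altLoop, dif_neg h]

-- "*/" cannot start inside the 20 marker characters (no '*' in the marker)
theorem no_star_in_marker (t : List Char) :
    ∀ j < bMarker.length, ¬ (['*', '/'] : List Char) <+: (bMarker ++ t).drop j := by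
  intro j hj hpre
  obtain ⟨u, hu⟩ := hpre
  have hj' : bMarker[j]? = some '*' := by
    have h1 : ((bMarker ++ t).drop j)[0]? = some '*' := by
      rw [← hu]; rfl
    rw [List.getElem?_drop, Nat.add_zero, List.getElem?_append_left hj] at h1
    exact h1
  have : '*' ∈ bMarker := List.mem_of_getElem? hj'
  revert this
  decide

-- ===== VERDICT (by name: the statement is the Claim_ definition above) =====
theorem apply_spec : Claim_equal_apply := by
  intro content _
  unfold Spec_apply apply apply_alt
  have hstarL : ("*/" : String).toList = ['*', '/'] := by decide
  simp only [PySem.Str.find_eq, PySem.Str.findFrom_eq, hstarL]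
  set cs := content.toList with hcs
  have hm20 : bMarker.length = 20 := by decide
  by_cases h0 : PySem.Chars.find cs bMarker = -1
  · -- no marker: A returns content; B's scanner never leaves state 0
    have hno : ∀ k, ¬ bMarker <+: cs.drop k := by
      intro k hk
      exact (PySem.Chars.find_eq_neg_one_iff _ _).mp h0 (prefix_drop_infix cs bMarker k hk)
    rw [show ("May you share freely" : String).toList = bMarker from rfl, h0]
    simp [loop0_none cs 0 hno]
  · -- marker found at i
    have hnn : 0 ≤ PySem.Chars.find cs bMarker := by
      have := PySem.Chars.neg_one_le_find cs bMarker
      omega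
    set i := (PySem.Chars.find cs bMarker).toNat with hi
    have hfind : PySem.Chars.find cs bMarker = (i : Int) := by omega
    have hile : i ≤ cs.length := by
      have := PySem.Chars.find_le_length cs bMarker
      omega
    obtain ⟨hpref, hmin⟩ := PySem.Chars.find_spec (s := cs) (sub := bMarker) hnn
    rw [← hi] at hpref hmin
    obtain ⟨t, ht⟩ := hpref
    have hds : cs.drop i = bMarker ++ t := ht.symm
    have hrest : cs.drop (i + 20) = t := by
      rw [← List.drop_drop, hds, ← hm20, List.drop_left]
    have hB0 : altLoop cs 0 0 = altLoop cs (i + 20) 1 := by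
      rw [← hm20]
      exact loop0_found cs 0 i (Nat.zero_le i) ⟨t, ht⟩ (fun k _ hk => hmin k hk)
    have hff : PySem.Chars.findFrom cs ['*', '/'] ((i : Int)) none =
        if PySem.Chars.find t ['*', '/'] = -1 then -1
        else (i : Int) + ((20 : Int) + PySem.Chars.find t ['*', '/']) := by
      rw [PySem.Chars.findFrom_natCast cs ['*', '/'] i hile, hds,
        find_append_of_no_left bMarker t ['*', '/'] (no_star_in_marker t), hm20]
      by_cases h' : PySem.Chars.find t ['*', '/'] = -1
      · simp [h']
      · have h2 : 0 ≤ PySem.Chars.find t ['*', '/'] := by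
          have := PySem.Chars.neg_one_le_find t ['*', '/']
          omega
        rw [if_neg h', if_neg (by push_cast; omega), if_neg h']
        push_cast
        ring
    rw [show ("May you share freely" : String).toList = bMarker from rfl, hfind]
    rw [if_neg (by simp : ¬ (((i : Int) == -1) = true))]
    by_cases hts : PySem.Chars.find t ['*', '/'] = -1
    · -- "*/" not found after the marker: A returns content; B's scanner ends in state 1
      rw [hff, if_pos hts]
      have hno : ∀ k, i + 20 ≤ k → ¬ ['*', '/'] <+: cs.drop k := by
        intro k hk hkp
        apply (PySem.Chars.find_eq_neg_one_iff t ['*', '/']).mp hts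
        apply prefix_drop_infix t ['*', '/'] (k - (i + 20))
        have he : cs.drop k = t.drop (k - (i + 20)) := by
          rw [← hrest, List.drop_drop, Nat.add_comm, Nat.sub_add_cancel hk]
        rwa [← he]
      simp [hB0, loop1_none cs (i + 20) hno]
    · -- both found "*/": same skip index, A slices, B drops
      have htnn : 0 ≤ PySem.Chars.find t ['*', '/'] := by
        have := PySem.Chars.neg_one_le_find t ['*', '/']
        omega
      set j := (PySem.Chars.find t ['*', '/']).toNat with hj
      have hjf : PySem.Chars.find t ['*', '/'] = (j : Int) := by omega
      obtain ⟨hp2, hmin2⟩ := PySem.Chars.find_spec (s := t) (sub := ['*', '/']) htnn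
      rw [← hj] at hp2 hmin2
      have hdropk : ∀ k, i + 20 ≤ k → cs.drop k = t.drop (k - (i + 20)) := by
        intro k hk
        rw [← hrest, List.drop_drop, Nat.add_comm, Nat.sub_add_cancel hk]
      have hB1 : altLoop cs (i + 20) 1 = altLoop cs (i + 20 + j + 2) 2 := by
        have := loop1_found cs (i + 20) (i + 20 + j) (by omega)
          (by rw [hdropk (i + 20 + j) (by omega)]; simpa using hp2)
          (by
            intro k hk hk' hpk
            rw [hdropk k hk] at hpk
            exact hmin2 (k - (i + 20)) (by omega) hpk)
        rwa [Nat.add_assoc (i + 20) j 2] at this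
      rw [hff, hjf]
      rw [if_neg (by omega : ¬ ((j : Int) = -1))]
      rw [if_neg (by simp; omega : ¬ ((((i : Int) + ((20 : Int) + (j : Int))) == -1) = true))]
      have hEnn : ((i : Int) + ((20 : Int) + (j : Int))).toNat + 2 = i + 20 + j + 2 := by omega
      rw [hEnn, hB0, hB1, loop2_skip]
      simp only [reduceIte]
      rw [← String.toList_inj, PySem.Str.toList_slice]
      rw [PySem.Chars.slice_eq_listSlice, PySem.List.slice_from_natCast, String.toList_ofList]
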